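-- pv_equiv track=rewrite | github.com/synthyverse/synthyverse | scripts/update_templates.py | generate_templates_table
-- ===== SOURCE A (Python) =====
-- def generate_templates_table(extras, categories):
--     """Generate a markdown table of all available templates with categories."""
--     # Map category names to display names and sort order
--     category_display = {
--         "generators": "Generator",
--         "evaluation": "Evaluation",
--         "all": "All",
--     }
--
--     category_order = {
--         "generators": 0,
--         "evaluation": 1,
--         "all": 2,
--     }
--
--     # Sort extras: first by category order, then alphabetically within category
--     # Put 'base' at the end of generators, and 'full' at the very end
--     def sort_key(extra_name):
--         if extra_name == "base":
--             # Put base at the end of generators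
--             return (category_order.get("generators", 999), "zzzzzzz_base")
--         if extra_name == "full":
--             # Put full at the very end
--             return (category_order.get("all", 999), "zzzzzzz_full")
--         category = categories.get(extra_name, "unknown")
--         return (category_order.get(category, 999), extra_name)
--
--     sorted_extras = sorted(extras.keys(), key=sort_key)
--
--     # Create table
--     lines = [
--         "## Available Installation Templates",
--         "",
--         "The following installation templates are available:",
--         "",
--         "| Template Name | Category | Installation Command |",
--         "|---------------|----------|----------------------|",
--     ]
--
--     for extra in sorted_extras:
--         category = categories.get(extra, "Unknown")
--         category_label = category_display.get(category, category.title())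
--         lines.append(
--             f"| `{extra}` | {category_label} | `pip install synthyverse[{extra}]` |"
--         )
--
--     lines.append("")
--     lines.append(
--         "**Note:** You can install multiple templates by separating them with commas, e.g., `pip install synthyverse[ctgan,eval]`"
--     )
--
--     return "\n".join(lines)
-- ===== SOURCE B (Python) =====
-- def generate_templates_table(extras, categories):
--     """Generate a markdown table of all available templates with categories."""
--     category_display = {
--         "generators": "Generator",
--         "evaluation": "Evaluation",
--         "all": "All",
--     }
--     category_order = {
--         "generators": 0,
--         "evaluation": 1,
--         "all": 2,
--     }
--
--     # One pass: drop each template name into the bucket for its order rank,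
--     # remembering the sort string; 'base'/'full' are pinned to the end of
--     # their sections, unknown categories fall into the trailing 999 bucket.
--     buckets = {0: [], 1: [], 2: [], 999: []}
--     for name in extras:
--         if name == "base":
--             buckets[0].append(("zzzzzzz_base", name))
--         elif name == "full":
--             buckets[2].append(("zzzzzzz_full", name))
--         else:
--             category = categories.get(name, "unknown")
--             buckets[category_order.get(category, 999)].append((name, name))
--
--     lines = [
--         "## Available Installation Templates",
--         "",
--         "The following installation templates are available:",
--         "",
--         "| Template Name | Category | Installation Command |",
--         "|---------------|----------|----------------------|",
--     ]
--
--     # Emit the buckets in rank order, each bucket stably sorted by sort string.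
--     for order in (0, 1, 2, 999):
--         for _, name in sorted(buckets[order], key=lambda t: t[0]):
--             category = categories.get(name, "Unknown")
--             category_label = category_display.get(category, category.title())
--             lines.append(
--                 f"| `{name}` | {category_label} | `pip install synthyverse[{name}]` |"
--             )
--
--     lines.append("")
--     lines.append(
--         "**Note:** You can install multiple templates by separating them with commas, e.g., `pip install synthyverse[ctgan,eval]`"
--     )
--
--     return "\n".join(lines)
-- ===== Notes on version B (the rewrite author's own statement) =====
-- stated objective: alternative
-- what changed: Replaces A's single stable sort of all names under a lexicographic (order, sort-string) tuple key by a one-pass bucketing of the names into the four fixed order ranks (0/1/2/999) followed by a per-bucket stable sort on the sort string alone, emitting the buckets in rank order.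
import Mathlib
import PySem

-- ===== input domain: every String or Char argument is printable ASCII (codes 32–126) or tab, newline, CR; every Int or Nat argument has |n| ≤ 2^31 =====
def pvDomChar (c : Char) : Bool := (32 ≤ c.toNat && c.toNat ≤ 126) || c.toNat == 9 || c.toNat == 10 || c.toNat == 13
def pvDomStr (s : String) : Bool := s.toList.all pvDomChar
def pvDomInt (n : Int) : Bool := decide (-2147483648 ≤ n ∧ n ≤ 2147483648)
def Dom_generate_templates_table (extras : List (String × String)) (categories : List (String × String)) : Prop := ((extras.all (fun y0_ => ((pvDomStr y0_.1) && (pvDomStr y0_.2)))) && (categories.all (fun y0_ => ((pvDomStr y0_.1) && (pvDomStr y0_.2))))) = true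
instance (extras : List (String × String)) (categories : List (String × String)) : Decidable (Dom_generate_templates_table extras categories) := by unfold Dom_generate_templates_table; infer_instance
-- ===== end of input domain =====

-- B re-decomposes A's single tuple-key sort into one bucketing pass over the names plus a
-- per-bucket sort by the secondary string (objective: alternative; same cost, grouped emission).

-- ===== shared helpers (literals and formatting both Python versions contain verbatim) =====

-- ASCII-exact port of str.title(): a letter is uppercased after a non-letter, lowercased after a letter
def pvTitleGo : Bool → List Char → List Char
  | _, [] => []
  | prev, c :: rest =>
    if PySem.Chars.isalpha c then
      (if prev then PySem.Chars.lowerChar c else PySem.Chars.upperChar c) :: pvTitleGo true rest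
    else c :: pvTitleGo false rest

def pvTitle (s : String) : String := String.ofList (pvTitleGo false s.toList)

def pvCategoryDisplay : PySem.Dict String String :=
  PySem.Dict.ofList [("generators", "Generator"), ("evaluation", "Evaluation"), ("all", "All")]

def pvCategoryOrder : PySem.Dict String Int :=
  PySem.Dict.ofList [("generators", 0), ("evaluation", 1), ("all", 2)]

-- the f-string row both versions emit
def pvRow (cats : PySem.Dict String String) (extra : String) : String :=
  let category := cats.getD extra "Unknown"
  let label := (pvCategoryDisplay.get? category).getD (pvTitle category)
  "| `" ++ extra ++ "` | " ++ label ++ " | `pip install synthyverse[" ++ extra ++ "]` |"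

def pvHeader : List String :=
  ["## Available Installation Templates",
   "",
   "The following installation templates are available:",
   "",
   "| Template Name | Category | Installation Command |",
   "|---------------|----------|----------------------|"]

def pvFooter : List String :=
  ["",
   "**Note:** You can install multiple templates by separating them with commas, e.g., `pip install synthyverse[ctgan,eval]`"]

-- ===== PORT A =====

def pvSortKey (cats : PySem.Dict String String) (name : String) : Int × String :=
  if name == "base" then ((pvCategoryOrder.get? "generators").getD 999, "zzzzzzz_base")
  else if name == "full" then ((pvCategoryOrder.get? "all").getD 999, "zzzzzzz_full")
  else
    let category := cats.getD name "unknown"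
    ((pvCategoryOrder.get? category).getD 999, name)

def generate_templates_table (extras : List (String × String)) (categories : List (String × String)) : String :=
  let cats := PySem.Dict.ofList categories
  let sortedExtras := PySem.List.sorted2 (PySem.Dict.ofList extras).keys
      (fun n => (pvSortKey cats n).1) (fun n => (pvSortKey cats n).2) false
  PySem.Str.join "\n" (pvHeader ++ sortedExtras.map (pvRow cats) ++ pvFooter)

-- ===== PORT B =====

-- one pass dropping each name, with its sort string, into the bucket of its order rank
def pvBuckets (keys : List String) (cats : PySem.Dict String String) :
    List (String × String) × List (String × String) × List (String × String) × List (String × String) :=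
  keys.foldl (fun b name =>
    if name == "base" then (b.1 ++ [("zzzzzzz_base", name)], b.2.1, b.2.2.1, b.2.2.2)
    else if name == "full" then (b.1, b.2.1, b.2.2.1 ++ [("zzzzzzz_full", name)], b.2.2.2)
    else
      let category := cats.getD name "unknown"
      let o := (pvCategoryOrder.get? category).getD 999
      if o == 0 then (b.1 ++ [(name, name)], b.2.1, b.2.2.1, b.2.2.2)
      else if o == 1 then (b.1, b.2.1 ++ [(name, name)], b.2.2.1, b.2.2.2)
      else if o == 2 then (b.1, b.2.1, b.2.2.1 ++ [(name, name)], b.2.2.2)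
      else (b.1, b.2.1, b.2.2.1, b.2.2.2 ++ [(name, name)]))
    ([], [], [], [])

def generate_templates_table_alt (extras : List (String × String)) (categories : List (String × String)) : String :=
  let cats := PySem.Dict.ofList categories
  let b := pvBuckets (PySem.Dict.ofList extras).keys cats
  let rows := [b.1, b.2.1, b.2.2.1, b.2.2.2].flatMap (fun bucket =>
    (PySem.List.sorted bucket (fun t => t.1) false).map (fun t => pvRow cats t.2))
  PySem.Str.join "\n" (pvHeader ++ rows ++ pvFooter)

-- ===== PRECONDITION & SPEC =====
def Spec_generate_templates_table (extras : List (String × String)) (categories : List (String × String)) (out : String) : Prop := out = generate_templates_table_alt extras categories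
instance (extras : List (String × String)) (categories : List (String × String)) (out : String) : Decidable (Spec_generate_templates_table extras categories out) := by unfold Spec_generate_templates_table; infer_instance

-- ===== CLAIM (what is proved, stated in full; the proofs are below) =====
def Claim_equal_generate_templates_table : Prop := ∀ (extras : List (String × String)) (categories : List (String × String)), Dom_generate_templates_table extras categories → Spec_generate_templates_table extras categories (generate_templates_table extras categories)

-- ===== LEMMAS AND PROOFS =====

-- insertBy skips a prefix it is never 'before'
theorem pv_insertBy_append_left {α : Type} (before : α → α → Bool) (x : α) (L1 L2 : List α)
    (h : ∀ y ∈ L1, before x y = false) :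
    PySem.List.insertBy before x (L1 ++ L2) = L1 ++ PySem.List.insertBy before x L2 := by
  induction L1 with
  | nil => rfl
  | cons y ys ih =>
    simp only [List.cons_append, PySem.List.insertBy, h y (by simp), Bool.false_eq_true, if_false]
    exact congrArg (y :: ·) (ih (fun z hz => h z (by simp [hz])))

-- insertBy never passes a suffix it is always 'before'
theorem pv_insertBy_append_right {α : Type} (before : α → α → Bool) (x : α) (B L2 : List α)
    (h : ∀ y ∈ L2, before x y = true) :
    PySem.List.insertBy before x (B ++ L2) = PySem.List.insertBy before x B ++ L2 := by
  induction B with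
  | nil =>
    cases L2 with
    | nil => rfl
    | cons z zs => simp [PySem.List.insertBy, h z (by simp)]
  | cons y ys ih =>
    simp only [List.cons_append, PySem.List.insertBy]
    by_cases hb : before x y = true
    · simp [hb]
    · simp only [hb]; simp [ih]

-- insertBy only looks at 'before x ·' on the list's members
theorem pv_insertBy_congr {α : Type} (before before' : α → α → Bool) (x : α) (B : List α)
    (h : ∀ y ∈ B, before x y = before' x y) :
    PySem.List.insertBy before x B = PySem.List.insertBy before' x B := by
  induction B with
  | nil => rfl
  | cons y ys ih =>
    simp only [PySem.List.insertBy, h y (by simp)]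
    rw [ih (fun z hz => h z (by simp [hz]))]

-- insertBy commutes with mapping an embedding that preserves the comparison
theorem pv_insertBy_map {α β : Type} (before : α → α → Bool) (before' : β → β → Bool)
    (g : α → β) (x : α) (B : List α) (h : ∀ a b, before' (g a) (g b) = before a b) :
    PySem.List.insertBy before' (g x) (B.map g) = (PySem.List.insertBy before x B).map g := by
  induction B with
  | nil => rfl
  | cons y ys ih =>
    simp only [List.map_cons, PySem.List.insertBy, h x y]
    by_cases hb : before x y = true
    · simp [hb]
    · simp only [hb]; simp [ih]

-- sorting a mapped list by a key that factors through the map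
theorem pv_sorted_map {α β : Type} (g : α → β) (key : β → String) (xs : List α) :
    PySem.List.sorted (xs.map g) key false = (PySem.List.sorted xs (fun a => key (g a)) false).map g := by
  rw [PySem.List.sorted_eq_foldl_insertBy, PySem.List.sorted_eq_foldl_insertBy, List.foldl_map]
  induction xs using List.reverseRecOn with
  | nil => rfl
  | append_singleton ys x ih =>
    rw [List.foldl_append, List.foldl_append, ih]
    exact pv_insertBy_map _ _ g x _ (fun a b => rfl)

-- the lexicographic comparison sorted2 uses
def pvLex (k1 : String → Int) (k2 : String → String) (a b : String) : Bool :=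
  decide (k1 a < k1 b) || !decide (k1 b < k1 a) && decide (k2 a < k2 b)

theorem pv_sorted2_eq_foldl (xs : List String) (k1 : String → Int) (k2 : String → String) :
    PySem.List.sorted2 xs k1 k2 false =
      xs.foldl (fun acc x => PySem.List.insertBy (pvLex k1 k2) x acc) [] := rfl

theorem pv_lex_lt (k1 : String → Int) (k2 : String → String) (x y : String) (h : k1 x < k1 y) :
    pvLex k1 k2 x y = true := by simp [pvLex, h]

theorem pv_lex_gt (k1 : String → Int) (k2 : String → String) (x y : String) (h : k1 y < k1 x) :
    pvLex k1 k2 x y = false := by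
  have h' : ¬ k1 x < k1 y := by omega
  simp [pvLex, h, h']

theorem pv_lex_eq (k1 : String → Int) (k2 : String → String) (x y : String) (h : k1 x = k1 y) :
    pvLex k1 k2 x y = decide (k2 x < k2 y) := by
  simp [pvLex, h]

def pvBucketOf (k1 : String → Int) (k2 : String → String) (o : Int) (xs : List String) : List String :=
  PySem.List.sorted (xs.filter (fun n => k1 n == o)) k2 false

theorem pv_mem_bucketOf (k1 : String → Int) (k2 : String → String) (o : Int) (xs : List String)
    (y : String) (hy : y ∈ pvBucketOf k1 k2 o xs) : k1 y = o := by
  unfold pvBucketOf at hy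
  rw [PySem.List.mem_sorted] at hy
  simpa using (List.of_mem_filter hy)

theorem pv_bucketOf_append (k1 : String → Int) (k2 : String → String) (o : Int)
    (xs : List String) (x : String) :
    pvBucketOf k1 k2 o (xs ++ [x]) =
      if k1 x = o then
        PySem.List.insertBy (fun a b => decide (k2 a < k2 b)) x (pvBucketOf k1 k2 o xs)
      else pvBucketOf k1 k2 o xs := by
  unfold pvBucketOf
  rw [List.filter_append]
  by_cases h : k1 x = o
  · simp only [List.filter_cons, List.filter_nil, h, beq_self_eq_true, if_true]
    rw [PySem.List.sorted_eq_foldl_insertBy, PySem.List.sorted_eq_foldl_insertBy, List.foldl_append]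
    rfl
  · simp [h]

-- a stable sort by the lexicographic pair is the concatenation of the per-order buckets
theorem pv_sorted2_buckets (xs : List String) (k1 : String → Int) (k2 : String → String)
    (hk : ∀ x, k1 x = 0 ∨ k1 x = 1 ∨ k1 x = 2 ∨ k1 x = 999) :
    PySem.List.sorted2 xs k1 k2 false =
      pvBucketOf k1 k2 0 xs ++ (pvBucketOf k1 k2 1 xs ++ (pvBucketOf k1 k2 2 xs ++ pvBucketOf k1 k2 999 xs)) := by
  induction xs using List.reverseRecOn with
  | nil => rfl
  | append_singleton ys x ih =>
    rw [pv_sorted2_eq_foldl, List.foldl_append, ← pv_sorted2_eq_foldl, ih]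
    simp only [List.foldl_cons, List.foldl_nil]
    rw [pv_bucketOf_append, pv_bucketOf_append, pv_bucketOf_append, pv_bucketOf_append]
    have m0 := pv_mem_bucketOf k1 k2 0 ys
    have m1 := pv_mem_bucketOf k1 k2 1 ys
    have m2 := pv_mem_bucketOf k1 k2 2 ys
    have m999 := pv_mem_bucketOf k1 k2 999 ys
    rcases hk x with h | h | h | h
    · -- bucket 0: insert into the first block, everything after compares 'before'
      rw [pv_insertBy_append_right _ _ _ _ (by
        intro y hy
        rcases List.mem_append.mp hy with hy | hy
        · exact pv_lex_lt k1 k2 x y (by rw [h, m1 y hy]; norm_num)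
        rcases List.mem_append.mp hy with hy | hy
        · exact pv_lex_lt k1 k2 x y (by rw [h, m2 y hy]; norm_num)
        · exact pv_lex_lt k1 k2 x y (by rw [h, m999 y hy]; norm_num))]
      rw [pv_insertBy_congr _ (fun a b => decide (k2 a < k2 b)) x _ (by
        intro y hy; exact pv_lex_eq k1 k2 x y (by rw [h, m0 y hy]))]
      simp [h]
    · -- bucket 1
      rw [pv_insertBy_append_left _ _ _ _ (by
        intro y hy; exact pv_lex_gt k1 k2 x y (by rw [h, m0 y hy]; norm_num))]
      rw [pv_insertBy_append_right _ _ _ _ (by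
        intro y hy
        rcases List.mem_append.mp hy with hy | hy
        · exact pv_lex_lt k1 k2 x y (by rw [h, m2 y hy]; norm_num)
        · exact pv_lex_lt k1 k2 x y (by rw [h, m999 y hy]; norm_num))]
      rw [pv_insertBy_congr _ (fun a b => decide (k2 a < k2 b)) x _ (by
        intro y hy; exact pv_lex_eq k1 k2 x y (by rw [h, m1 y hy]))]
      simp [h]
    · -- bucket 2
      rw [← List.append_assoc]
      rw [pv_insertBy_append_left _ _ _ _ (by
        intro y hy
        rcases List.mem_append.mp hy with hy | hy
        · exact pv_lex_gt k1 k2 x y (by rw [h, m0 y hy]; norm_num)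
        · exact pv_lex_gt k1 k2 x y (by rw [h, m1 y hy]; norm_num))]
      rw [pv_insertBy_append_right _ _ _ _ (by
        intro y hy; exact pv_lex_lt k1 k2 x y (by rw [h, m999 y hy]; norm_num))]
      rw [pv_insertBy_congr _ (fun a b => decide (k2 a < k2 b)) x _ (by
        intro y hy; exact pv_lex_eq k1 k2 x y (by rw [h, m2 y hy]))]
      simp [h, List.append_assoc]
    · -- bucket 999
      rw [← List.append_assoc, ← List.append_assoc]
      rw [pv_insertBy_append_left _ _ _ _ (by
        intro y hy
        rcases List.mem_append.mp hy with hy | hy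
        · rcases List.mem_append.mp hy with hy | hy
          · exact pv_lex_gt k1 k2 x y (by rw [h, m0 y hy]; norm_num)
          · exact pv_lex_gt k1 k2 x y (by rw [h, m1 y hy]; norm_num)
        · exact pv_lex_gt k1 k2 x y (by rw [h, m2 y hy]; norm_num))]
      rw [pv_insertBy_congr _ (fun a b => decide (k2 a < k2 b)) x _ (by
        intro y hy; exact pv_lex_eq k1 k2 x y (by rw [h, m999 y hy]))]
      simp [h, List.append_assoc]

theorem pv_order_items : pvCategoryOrder.items = [("generators", 0), ("evaluation", 1), ("all", 2)] := by
  decide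

theorem pv_order_get (s : String) :
    (pvCategoryOrder.get? s).getD 999 = 0 ∨ (pvCategoryOrder.get? s).getD 999 = 1 ∨
    (pvCategoryOrder.get? s).getD 999 = 2 ∨ (pvCategoryOrder.get? s).getD 999 = 999 := by
  simp [PySem.Dict.get?, pv_order_items, List.find?]
  cases ("generators" == s) <;> cases ("evaluation" == s) <;> cases ("all" == s) <;> simp

theorem pv_sortKey_cases (cats : PySem.Dict String String) (n : String) :
    (pvSortKey cats n).1 = 0 ∨ (pvSortKey cats n).1 = 1 ∨ (pvSortKey cats n).1 = 2 ∨ (pvSortKey cats n).1 = 999 := by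
  unfold pvSortKey
  by_cases h1 : n == "base"
  · left; simp [h1]; decide
  by_cases h2 : n == "full"
  · right; right; left; simp [h1, h2]; decide
  · simp only [h1, h2, Bool.false_eq_true, if_false]
    exact pv_order_get _

-- pvBuckets is bucketed filtering, with each name paired with its sort string
theorem pv_buckets_eq_filter (keys : List String) (cats : PySem.Dict String String) :
    pvBuckets keys cats =
      ((keys.filter (fun n => (pvSortKey cats n).1 == 0)).map (fun n => ((pvSortKey cats n).2, n)),
       (keys.filter (fun n => (pvSortKey cats n).1 == 1)).map (fun n => ((pvSortKey cats n).2, n)),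
       (keys.filter (fun n => (pvSortKey cats n).1 == 2)).map (fun n => ((pvSortKey cats n).2, n)),
       (keys.filter (fun n => (pvSortKey cats n).1 == 999)).map (fun n => ((pvSortKey cats n).2, n))) := by
  induction keys using List.reverseRecOn with
  | nil => rfl
  | append_singleton ys x ih =>
    unfold pvBuckets
    rw [List.foldl_append]
    rw [show ys.foldl _ ([], [], [], []) = pvBuckets ys cats from rfl, ih]
    simp only [List.foldl_cons, List.foldl_nil, List.filter_append, List.filter_cons,
      List.filter_nil, List.map_append]
    by_cases h1 : x == "base"
    · have hx : x = "base" := by simpa using h1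
      subst hx
      have hb : pvSortKey cats "base" = (0, "zzzzzzz_base") := by
        simp [pvSortKey, show ((pvCategoryOrder.get? "generators").getD 999) = (0 : Int) from by decide]
      simp [hb]
    · by_cases h2 : x == "full"
      · have hx : x = "full" := by simpa using h2
        subst hx
        have hf : pvSortKey cats "full" = (2, "zzzzzzz_full") := by
          simp [pvSortKey, h1, show ((pvCategoryOrder.get? "all").getD 999) = (2 : Int) from by decide]
        simp [h1, hf]
      · simp only [h1, h2, Bool.false_eq_true, if_false]
        have hsk : pvSortKey cats x = ((pvCategoryOrder.get? (cats.getD x "unknown")).getD 999, x) := by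
          simp [pvSortKey, h1, h2]
        rcases pv_order_get (cats.getD x "unknown") with h | h | h | h <;>
          simp [hsk, h]

theorem pv_bucket_rows (cats : PySem.Dict String String) (keys : List String) (o : Int) :
    ((PySem.List.sorted
        ((keys.filter (fun n => (pvSortKey cats n).1 == o)).map (fun n => ((pvSortKey cats n).2, n)))
        (fun t => t.1) false).map (fun t => pvRow cats t.2)) =
      (pvBucketOf (fun n => (pvSortKey cats n).1) (fun n => (pvSortKey cats n).2) o keys).map (pvRow cats) := by
  rw [pv_sorted_map (fun n => ((pvSortKey cats n).2, n)) (fun t => t.1)]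
  rw [List.map_map]
  rfl

-- ===== VERDICT (by name: the statement is the Claim_ definition above) =====
theorem generate_templates_table_spec : Claim_equal_generate_templates_table := by
  intro extras categories _
  unfold Spec_generate_templates_table
  dsimp only [generate_templates_table, generate_templates_table_alt]
  rw [pv_sorted2_buckets _ _ _ (fun x => pv_sortKey_cases (PySem.Dict.ofList categories) x)]
  rw [pv_buckets_eq_filter]
  simp only [List.flatMap_cons, List.flatMap_nil, List.append_nil]
  rw [pv_bucket_rows, pv_bucket_rows, pv_bucket_rows, pv_bucket_rows]
  simp [List.map_append, List.append_assoc]
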